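-- pv_equiv track=rewrite | github.com/SvetaTrusova/algorithm-adn-data-structures-2 | lab6/task2/src/task2.py | manage_phonebook
-- ===== SOURCE A (Python) =====
-- def manage_phonebook(data):
--     phonebook = {}
--     result = []
--
--     for query in data:
--         command = query.split()[0]
--
--         if command == 'add':
--             phonebook[query.split()[1]] = query.split()[2]
--
--         elif command == 'del':
--             number = query.split()[1]
--             if number in phonebook:
--                 del phonebook[number]
--
--         elif command == 'find':
--             number = query.split()[1]
--             if number in phonebook:
--                 result.append(phonebook[number])
--             else:
--                 result.append('not found')
--
--     return result
-- ===== SOURCE B (Python) =====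
-- def manage_phonebook(data):
--     # Stateless offline approach: no phonebook is maintained; each 'find' is
--     # answered by scanning backwards for the latest 'add'/'del' of that number.
--     result = []
--     for i, query in enumerate(data):
--         parts = query.split()
--         if parts[0] == 'find':
--             num = parts[1]
--             ans = 'not found'
--             for j in range(i - 1, -1, -1):
--                 p = data[j].split()
--                 if p[0] == 'add' and p[1] == num:
--                     ans = p[2]
--                     break
--                 if p[0] == 'del' and p[1] == num:
--                     break
--             result.append(ans)
--     return result
-- ===== Notes on version B (the rewrite author's own statement) =====
-- stated objective: alternative
-- what changed: B maintains no phonebook state at all: each 'find' query is answered by scanning backwards through the earlier commands for the most recent 'add' or 'del' of that number (last-write-wins replay), instead of keeping an updated key-to-value store.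
import Mathlib
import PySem

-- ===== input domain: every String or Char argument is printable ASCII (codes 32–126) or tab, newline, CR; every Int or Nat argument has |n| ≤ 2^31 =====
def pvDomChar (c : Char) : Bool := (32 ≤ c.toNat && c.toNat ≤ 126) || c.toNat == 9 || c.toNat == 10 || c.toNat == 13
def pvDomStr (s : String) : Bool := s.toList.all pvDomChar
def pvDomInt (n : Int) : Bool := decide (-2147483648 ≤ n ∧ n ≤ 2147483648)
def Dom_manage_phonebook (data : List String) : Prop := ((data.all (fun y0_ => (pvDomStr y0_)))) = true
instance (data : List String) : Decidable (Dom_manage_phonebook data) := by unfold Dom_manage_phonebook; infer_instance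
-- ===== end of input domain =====

-- B keeps no phonebook state: each 'find' is answered by a backward scan of the earlier
-- commands for the latest 'add'/'del' of that number — an alternative algorithm, not faster.


-- ===== PORT A =====
-- loop body of A, extracted as a helper; state = (phonebook, result)
def pvStepA (st : PySem.Dict String String × List String) (query : String) :
    PySem.Dict String String × List String :=
  let command := PySem.List.pyGetD (PySem.Str.split₀ query) 0 ""
  if command = "add" then
    (st.1.insert (PySem.List.pyGetD (PySem.Str.split₀ query) 1 "")
                 (PySem.List.pyGetD (PySem.Str.split₀ query) 2 ""), st.2)
  else if command = "del" then
    let number := PySem.List.pyGetD (PySem.Str.split₀ query) 1 ""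
    (if st.1.contains number then st.1.erase number else st.1, st.2)
  else if command = "find" then
    let number := PySem.List.pyGetD (PySem.Str.split₀ query) 1 ""
    (st.1, st.2 ++ [if st.1.contains number then st.1.getD number "" else "not found"])
  else st

def manage_phonebook (data : List String) : List String :=
  (data.foldl pvStepA (PySem.Dict.empty, [])).2

-- ===== PORT B =====
-- B's inner backward loop: for j in range(i-1,-1,-1) over data, looking for the
-- latest 'add'/'del' of num; the Nat argument is the exclusive upper bound i.
def pvScanBack (data : List String) : Nat → String → String
  | 0, _ => "not found"
  | j + 1, num =>
    let p := PySem.Str.split₀ (data.getD j "")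
    if PySem.List.pyGetD p 0 "" = "add" ∧ PySem.List.pyGetD p 1 "" = num then
      PySem.List.pyGetD p 2 ""
    else if PySem.List.pyGetD p 0 "" = "del" ∧ PySem.List.pyGetD p 1 "" = num then
      "not found"
    else pvScanBack data j num

-- B's outer loop: walk the queries with their index, emitting one answer per 'find'
def pvGo (data : List String) : List String → Nat → List String
  | [], _ => []
  | query :: rest, i =>
    let parts := PySem.Str.split₀ query
    (if PySem.List.pyGetD parts 0 "" = "find" then
       [pvScanBack data i (PySem.List.pyGetD parts 1 "")]
     else []) ++ pvGo data rest (i + 1)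

def manage_phonebook_alt (data : List String) : List String := pvGo data data 0

-- ===== PRECONDITION & SPEC =====
-- Pre_ excludes exactly the inputs where A raises IndexError: a query with no tokens,
-- an 'add' with fewer than 3 tokens, or a 'del'/'find' with fewer than 2 tokens.
def Pre_manage_phonebook (data : List String) : Prop :=
  ∀ q ∈ data,
    (PySem.Str.split₀ q) ≠ [] ∧
    ((PySem.Str.split₀ q).getD 0 "" = "add" → 3 ≤ (PySem.Str.split₀ q).length) ∧
    ((PySem.Str.split₀ q).getD 0 "" = "del" ∨ (PySem.Str.split₀ q).getD 0 "" = "find" →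
      2 ≤ (PySem.Str.split₀ q).length)
instance (data : List String) : Decidable (Pre_manage_phonebook data) := by
  unfold Pre_manage_phonebook; infer_instance

def pvWitness_manage_phonebook : List String :=
  ["add 911 police", "find 911", "del 911", "find 911", "add 911 fire", "find 911"]

def Spec_manage_phonebook (data : List String) (out : List String) : Prop := out = manage_phonebook_alt data
instance (data : List String) (out : List String) : Decidable (Spec_manage_phonebook data out) := by unfold Spec_manage_phonebook; infer_instance

-- ===== CLAIM (what is proved, stated in full; the proofs are below) =====
def Claim_equal_manage_phonebook : Prop := ∀ (data : List String), Dom_manage_phonebook data → Pre_manage_phonebook data → Spec_manage_phonebook data (manage_phonebook data)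

-- ===== LEMMAS AND PROOFS =====

-- Proof-only intermediate: an association-list phonebook, bridging A's dict state
-- to B's stateless backward scans.
def pvBookAdd : List (String × String) → String → String → List (String × String)
  | [], num, val => [(num, val)]
  | p :: rest, num, val => if p.1 = num then (p.1, val) :: rest else p :: pvBookAdd rest num val

def pvBookDel : List (String × String) → String → List (String × String)
  | [], _ => []
  | p :: rest, num => if p.1 = num then rest else p :: pvBookDel rest num

def pvBookFind : List (String × String) → String → String
  | [], _ => "not found"
  | p :: rest, num => if p.1 = num then p.2 else pvBookFind rest num

def pvStepB (st : List (String × String) × List String) (query : String) :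
    List (String × String) × List String :=
  let parts := PySem.Str.split₀ query
  let cmd := PySem.List.pyGetD parts 0 ""
  if cmd = "add" then
    (pvBookAdd st.1 (PySem.List.pyGetD parts 1 "") (PySem.List.pyGetD parts 2 ""), st.2)
  else if cmd = "del" then
    (pvBookDel st.1 (PySem.List.pyGetD parts 1 ""), st.2)
  else if cmd = "find" then
    (st.1, st.2 ++ [pvBookFind st.1 (PySem.List.pyGetD parts 1 "")])
  else st

theorem pvKeys_bookAdd (book : List (String × String)) (num val : String) :
    (pvBookAdd book num val).map Prod.fst =
      if num ∈ book.map Prod.fst then book.map Prod.fst else book.map Prod.fst ++ [num] := by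
  induction book with
  | nil => simp [pvBookAdd]
  | cons p rest ih =>
    by_cases h : p.1 = num
    · simp [pvBookAdd, h]
    · simp only [pvBookAdd, h, if_false, List.map_cons, ih]
      by_cases hm : num ∈ rest.map Prod.fst
      · simp [hm, Ne.symm h]
      · simp [hm, Ne.symm h]

theorem pvNodup_bookAdd (book : List (String × String)) (num val : String)
    (hnd : (book.map Prod.fst).Nodup) : ((pvBookAdd book num val).map Prod.fst).Nodup := by
  rw [pvKeys_bookAdd]
  split_ifs with h
  · exact hnd
  · exact hnd.append (List.nodup_singleton num) (by simpa using h)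

theorem pvBookDel_keys_sublist (book : List (String × String)) (num : String) :
    ∀ x, x ∈ (pvBookDel book num).map Prod.fst → x ∈ book.map Prod.fst := by
  induction book with
  | nil => simp [pvBookDel]
  | cons q r ihq =>
    intro x hx
    by_cases hq : q.1 = num
    · simp only [pvBookDel, hq, if_true] at hx
      simp [hx]
    · simp only [pvBookDel, hq, if_false, List.map_cons, List.mem_cons] at hx ⊢
      rcases hx with hx | hx
      · exact Or.inl hx
      · exact Or.inr (ihq x hx)

theorem pvNodup_bookDel (book : List (String × String)) (num : String)
    (hnd : (book.map Prod.fst).Nodup) : ((pvBookDel book num).map Prod.fst).Nodup := by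
  induction book with
  | nil => simp [pvBookDel]
  | cons p rest ih =>
    simp only [List.map_cons, List.nodup_cons] at hnd
    by_cases h : p.1 = num
    · simpa [pvBookDel, h] using hnd.2
    · simp only [pvBookDel, h, if_false, List.map_cons, List.nodup_cons]
      exact ⟨fun hm => hnd.1 (pvBookDel_keys_sublist rest num p.1 hm), ih hnd.2⟩

theorem pvItems_bookAdd (book : List (String × String)) (num val : String)
    (hnd : (book.map Prod.fst).Nodup) :
    pvBookAdd book num val =
      if (book.any fun p => p.1 == num) then
        book.map (fun p => if p.1 == num then (num, val) else p)
      else book ++ [(num, val)] := by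
  induction book with
  | nil => simp [pvBookAdd]
  | cons p rest ih =>
    simp only [List.map_cons, List.nodup_cons] at hnd
    by_cases h : p.1 = num
    · have hrest : rest.map (fun q => if q.1 = num then (num, val) else q) = rest := by
        have hcq : ∀ q ∈ rest, (if q.1 = num then ((num, val) : String × String) else q) = q := by
          intro q hq
          have hne : q.1 ≠ num := by
            intro he
            apply hnd.1
            rw [h, ← he]
            exact List.mem_map_of_mem hq
          simp [hne]
        exact (List.map_congr_left hcq).trans (List.map_id _)
      simp [pvBookAdd, h, hrest]
    · simp only [pvBookAdd, h, if_false, List.any_cons, beq_iff_eq, List.map_cons, ih hnd.2]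
      by_cases hc : (rest.any fun q => q.1 == num) = true
      · simp [hc]
      · simp only [Bool.not_eq_true] at hc
        simp [hc, h]

theorem pvInsert_eq_bookAdd (book : List (String × String)) (num val : String)
    (hnd : (book.map Prod.fst).Nodup) :
    (PySem.Dict.mk book).insert num val = PySem.Dict.mk (pvBookAdd book num val) := by
  apply PySem.Dict.ext
  rw [pvItems_bookAdd book num val hnd]
  simp only [PySem.Dict.insert, PySem.Dict.contains]
  split_ifs <;> rfl

theorem pvErase_eq_bookDel (book : List (String × String)) (num : String)
    (hnd : (book.map Prod.fst).Nodup) :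
    book.filter (fun p => !(p.1 == num)) = pvBookDel book num := by
  induction book with
  | nil => rfl
  | cons p rest ih =>
    simp only [List.map_cons, List.nodup_cons] at hnd
    by_cases h : p.1 = num
    · have : rest.filter (fun q => !(q.1 == num)) = rest := by
        apply List.filter_eq_self.mpr
        intro q hq
        have hne : q.1 ≠ num := by
          intro he
          apply hnd.1
          rw [h, ← he]
          exact List.mem_map_of_mem hq
        simp [hne]
      simp [pvBookDel, h, this]
    · simp [pvBookDel, h, ih hnd.2]

theorem pvFind_eq_bookFind (book : List (String × String)) (num : String) :
    (if book.any (fun p => p.1 == num) then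
       ((book.find? (fun p => p.1 == num)).map Prod.snd).getD "" else "not found")
      = pvBookFind book num := by
  induction book with
  | nil => rfl
  | cons p rest ih =>
    by_cases h : p.1 = num
    · rw [List.find?_cons_of_pos (by simp [h])]
      simp [pvBookFind, h]
    · rw [List.find?_cons_of_neg (by simp [h])]
      simp only [pvBookFind, h, if_false, List.any_cons]
      have hb : (p.1 == num) = false := by simp [h]
      simp only [hb, Bool.false_or]
      exact ih

theorem pvBookDel_of_not_mem (book : List (String × String)) (num : String)
    (h : (book.any fun p => p.1 == num) = false) : pvBookDel book num = book := by
  induction book with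
  | nil => rfl
  | cons p rest ih =>
    simp only [List.any_cons, Bool.or_eq_false_iff] at h
    have hp : p.1 ≠ num := by simpa using h.1
    simp [pvBookDel, hp, ih h.2]

theorem pvStep_eq (query : String) (book : List (String × String)) (res : List String)
    (hnd : (book.map Prod.fst).Nodup) :
    pvStepA (PySem.Dict.mk book, res) query =
      (PySem.Dict.mk (pvStepB (book, res) query).1, (pvStepB (book, res) query).2) := by
  unfold pvStepA pvStepB
  set parts := PySem.Str.split₀ query with hp
  by_cases h1 : PySem.List.pyGetD parts 0 "" = "add"
  · simp only [h1, if_true]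
    exact Prod.ext (pvInsert_eq_bookAdd book _ _ hnd) rfl
  · by_cases h2 : PySem.List.pyGetD parts 0 "" = "del"
    · simp only [h2, if_neg h1, if_true]
      refine Prod.ext ?_ rfl
      by_cases hc : (PySem.Dict.mk book).contains (PySem.List.pyGetD parts 1 "") = true
      · simp only [hc, if_true, PySem.Dict.erase]
        exact congrArg PySem.Dict.mk (pvErase_eq_bookDel book _ hnd)
      · have hcf : (book.any fun p => p.1 == PySem.List.pyGetD parts 1 "") = false := by
          simp only [PySem.Dict.contains] at hc
          exact Bool.eq_false_iff.mpr hc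
        simp only [hc]
        exact congrArg PySem.Dict.mk (pvBookDel_of_not_mem book _ hcf).symm
    · by_cases h3 : PySem.List.pyGetD parts 0 "" = "find"
      · simp only [h3, if_neg h1, if_neg h2, if_true]
        refine Prod.ext rfl ?_
        congr 1
        rw [← pvFind_eq_bookFind book]
        rfl
      · simp [h1, h2, h3]

theorem pvNodup_stepB (query : String) (book : List (String × String)) (res : List String)
    (hnd : (book.map Prod.fst).Nodup) : (((pvStepB (book, res) query).1).map Prod.fst).Nodup := by
  unfold pvStepB
  dsimp only
  split_ifs
  · exact pvNodup_bookAdd book _ _ hnd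
  · exact pvNodup_bookDel book _ hnd
  · exact hnd
  · exact hnd

theorem pvLoop_eq (data : List String) :
    ∀ (book : List (String × String)) (res : List String),
      (book.map Prod.fst).Nodup →
      data.foldl pvStepA (PySem.Dict.mk book, res) =
        (PySem.Dict.mk (data.foldl pvStepB (book, res)).1, (data.foldl pvStepB (book, res)).2) := by
  induction data with
  | nil => intro book res _; rfl
  | cons q rest ih =>
    intro book res hnd
    simp only [List.foldl_cons]
    rw [pvStep_eq q book res hnd]
    have := ih (pvStepB (book, res) q).1 (pvStepB (book, res) q).2 (pvNodup_stepB q book res hnd)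
    simpa using this

-- ===== assoc-list ↔ backward-scan bridge =====

theorem pvFind_bookAdd (book : List (String × String)) (k v num : String) :
    pvBookFind (pvBookAdd book k v) num = if num = k then v else pvBookFind book num := by
  induction book with
  | nil =>
    by_cases h : num = k <;> simp [pvBookAdd, pvBookFind, h, Ne.symm]
  | cons p rest ih =>
    by_cases hp : p.1 = k
    · by_cases h : num = k
      · simp [pvBookAdd, pvBookFind, hp, h]
      · have hk : ¬ k = num := fun he => h he.symm
        simp [pvBookAdd, pvBookFind, hp, hk, h]
    · by_cases hq : p.1 = num
      · have h : ¬ num = k := fun he => hp (hq.trans he)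
        simp [pvBookAdd, pvBookFind, hp, hq, h]
      · simp [pvBookAdd, pvBookFind, hp, hq, ih]

theorem pvFind_not_mem (book : List (String × String)) (num : String)
    (h : num ∉ book.map Prod.fst) : pvBookFind book num = "not found" := by
  induction book with
  | nil => rfl
  | cons p rest ih =>
    simp only [List.map_cons, List.mem_cons, not_or] at h
    have hp : p.1 ≠ num := fun he => h.1 he.symm
    simp [pvBookFind, hp, ih h.2]

theorem pvFind_bookDel (book : List (String × String)) (k num : String)
    (hnd : (book.map Prod.fst).Nodup) :
    pvBookFind (pvBookDel book k) num = if num = k then "not found" else pvBookFind book num := by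
  induction book with
  | nil => simp [pvBookDel, pvBookFind]
  | cons p rest ih =>
    simp only [List.map_cons, List.nodup_cons] at hnd
    by_cases hp : p.1 = k
    · by_cases h : num = k
      · rw [h]
        have : k ∉ rest.map Prod.fst := hp ▸ hnd.1
        simp [pvBookDel, hp, pvFind_not_mem rest k this]
      · have hne : p.1 ≠ num := by rw [hp]; exact fun he => h he.symm
        rw [show pvBookDel (p :: rest) k = rest from by simp [pvBookDel, hp], if_neg h]
        simp [pvBookFind, hne]
    · by_cases hq : p.1 = num
      · have h : ¬ num = k := fun he => hp (hq.trans he)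
        simp [pvBookDel, pvBookFind, hp, hq, h]
      · simp [pvBookDel, pvBookFind, hp, hq, ih hnd.2]

theorem pvFold_eq_go (data : List String) :
    ∀ (rest : List String) (i : Nat) (book : List (String × String)) (res : List String),
      rest = data.drop i →
      (book.map Prod.fst).Nodup →
      (∀ num, pvBookFind book num = pvScanBack data i num) →
      (rest.foldl pvStepB (book, res)).2 = res ++ pvGo data rest i := by
  intro rest
  induction rest with
  | nil => intro i book res _ _ _; simp [pvGo]
  | cons q rest' ih =>
    intro i book res hdrop hnd hinv
    have hget : data.getD i "" = q := by
      have h0 : data[i]? = some q := by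
        have h := congrArg (fun l => l[0]?) hdrop.symm
        simpa [List.getElem?_drop] using h
      simp [List.getD, h0]
    have hdrop' : rest' = data.drop (i + 1) := by
      have := congrArg List.tail hdrop
      simpa [List.tail_drop] using this
    have hscan : ∀ num, pvScanBack data (i + 1) num =
        (let p := PySem.Str.split₀ q
         if PySem.List.pyGetD p 0 "" = "add" ∧ PySem.List.pyGetD p 1 "" = num then
           PySem.List.pyGetD p 2 ""
         else if PySem.List.pyGetD p 0 "" = "del" ∧ PySem.List.pyGetD p 1 "" = num then
           "not found"
         else pvScanBack data i num) := by
      intro num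
      simp only [pvScanBack, hget]
    simp only [List.foldl_cons, pvGo]
    set parts := PySem.Str.split₀ q with hparts
    by_cases h1 : PySem.List.pyGetD parts 0 "" = "add"
    · have hstep : pvStepB (book, res) q =
          (pvBookAdd book (PySem.List.pyGetD parts 1 "") (PySem.List.pyGetD parts 2 ""), res) := by
        simp [pvStepB, ← hparts, h1]
      rw [hstep,
        ih (i + 1) _ res hdrop' (pvNodup_bookAdd book _ _ hnd) ?_]
      · have hfind : ¬ PySem.List.pyGetD parts 0 "" = "find" := by
          rw [h1]; decide
        simp [hfind]
      · intro num
        rw [hscan num, pvFind_bookAdd]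
        have hdel : ¬ (PySem.List.pyGetD parts 0 "" = "del" ∧
            PySem.List.pyGetD parts 1 "" = num) := by
          rintro ⟨hd, -⟩; rw [h1] at hd; exact absurd hd (by decide)
        by_cases he : num = PySem.List.pyGetD parts 1 ""
        · simp [← hparts, h1, he, hdel]
        · have he' : ¬ PySem.List.pyGetD parts 1 "" = num := fun h => he h.symm
          simp [← hparts, h1, he, he', hdel, hinv num]
    · by_cases h2 : PySem.List.pyGetD parts 0 "" = "del"
      · have hstep : pvStepB (book, res) q =
            (pvBookDel book (PySem.List.pyGetD parts 1 ""), res) := by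
          simp [pvStepB, ← hparts, h1, h2]
        rw [hstep, ih (i + 1) _ res hdrop' (pvNodup_bookDel book _ hnd) ?_]
        · have hfind : ¬ PySem.List.pyGetD parts 0 "" = "find" := by
            rw [h2]; decide
          simp [hfind]
        · intro num
          rw [hscan num, pvFind_bookDel book _ num hnd]
          have hadd : ¬ (PySem.List.pyGetD parts 0 "" = "add" ∧
              PySem.List.pyGetD parts 1 "" = num) := by
            rintro ⟨hd, -⟩; rw [h2] at hd; exact absurd hd (by decide)
          by_cases he : num = PySem.List.pyGetD parts 1 ""
          · simp [← hparts, h2, he, hadd]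
          · have he' : ¬ PySem.List.pyGetD parts 1 "" = num := fun h => he h.symm
            simp [← hparts, h2, he, he', hadd, hinv num]
      · have hinv' : ∀ num, pvBookFind book num = pvScanBack data (i + 1) num := by
          intro num
          rw [hscan num]
          have hadd : ¬ (PySem.List.pyGetD parts 0 "" = "add" ∧
              PySem.List.pyGetD parts 1 "" = num) := fun ⟨hd, _⟩ => h1 hd
          have hdel : ¬ (PySem.List.pyGetD parts 0 "" = "del" ∧
              PySem.List.pyGetD parts 1 "" = num) := fun ⟨hd, _⟩ => h2 hd
          simp [← hparts, hadd, hdel, hinv num]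
        by_cases h3 : PySem.List.pyGetD parts 0 "" = "find"
        · have hstep : pvStepB (book, res) q =
              (book, res ++ [pvBookFind book (PySem.List.pyGetD parts 1 "")]) := by
            simp [pvStepB, ← hparts, h1, h2, h3]
          rw [hstep, ih (i + 1) book _ hdrop' hnd hinv']
          simp [h3, hinv (PySem.List.pyGetD parts 1 "")]
        · have hstep : pvStepB (book, res) q = (book, res) := by
            simp [pvStepB, ← hparts, h1, h2, h3]
          rw [hstep, ih (i + 1) book res hdrop' hnd hinv']
          simp [h3]

-- ===== VERDICT (by name: the statement is the Claim_ definition above) =====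
theorem manage_phonebook_spec : Claim_equal_manage_phonebook := by
  intro data _ _
  unfold Spec_manage_phonebook manage_phonebook manage_phonebook_alt
  have h := pvLoop_eq data [] [] (by simp)
  have he : (PySem.Dict.empty : PySem.Dict String String) = PySem.Dict.mk [] := rfl
  rw [he, h]
  exact pvFold_eq_go data data 0 [] [] rfl (by simp) (fun num => rfl)
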